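-- pv_equiv track=rewrite | github.com/Cokins-Christopher/mahjong-hand-calculator | backend/src/mahjong/tile_calculator.py | _calculate_sequence_potential
-- ===== SOURCE A (Python) =====
-- from typing import List, Dict, Tuple
--
-- def _calculate_sequence_potential(tile: str, all_tiles: List[str]) -> float:
--     """Calculate how valuable a tile is for forming sequences"""
--     if not tile.endswith(('B', 'C', 'D')):
--         return 0  # Only numbered tiles can form sequences
--
--     number = int(tile[0])
--     suit = tile[-1]
--
--     # Check for adjacent tiles
--     adjacent_tiles = []
--     if number > 1:
--         adjacent_tiles.append(f"{number-1}{suit}")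
--     if number < 9:
--         adjacent_tiles.append(f"{number+1}{suit}")
--
--     # Check for tiles 2 away (for 123, 234, etc.)
--     two_away_tiles = []
--     if number > 2:
--         two_away_tiles.append(f"{number-2}{suit}")
--     if number < 8:
--         two_away_tiles.append(f"{number+2}{suit}")
--
--     # Count how many adjacent tiles exist
--     adjacent_count = sum(1 for t in adjacent_tiles if t in all_tiles)
--     two_away_count = sum(1 for t in two_away_tiles if t in all_tiles)
--
--     # Score based on sequence potential
--     if adjacent_count == 2:
--         return 6  # Can form immediate sequence
--     elif adjacent_count == 1:
--         return 3  # Part of potential sequence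
--     elif two_away_count > 0:
--         return 1  # Could form sequence with one more tile
--     else:
--         return 0
-- ===== SOURCE B (Python) =====
-- from typing import List
--
-- def _calculate_sequence_potential(tile: str, all_tiles: List[str]) -> float:
--     """Single pass over the hand: classify each tile by its offset from `tile`."""
--     if not tile.endswith(('B', 'C', 'D')):
--         return 0  # Only numbered tiles can form sequences
--
--     number = int(tile[0])
--     suit = tile[-1]
--
--     has_m1 = has_p1 = has_m2 = has_p2 = False
--     for t in all_tiles:
--         if len(t) == 2 and t[1] == suit and "0" <= t[0] <= "9":
--             d = ord(t[0]) - ord("0") - number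
--             if d == -1 and number > 1:
--                 has_m1 = True
--             elif d == 1 and number < 9:
--                 has_p1 = True
--             elif d == -2 and number > 2:
--                 has_m2 = True
--             elif d == 2 and number < 8:
--                 has_p2 = True
--
--     adjacent_count = int(has_m1) + int(has_p1)
--     if adjacent_count == 2:
--         return 6
--     if adjacent_count == 1:
--         return 3
--     if has_m2 or has_p2:
--         return 1
--     return 0
-- ===== Notes on version B (the rewrite author's own statement) =====
-- stated objective: alternative
-- what changed: Instead of generating candidate neighbour strings and probing each with a membership scan of the hand, B makes a single pass over all_tiles, parsing each tile and setting existence flags for offsets -1/+1/-2/+2 from the target number.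
import Mathlib
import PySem

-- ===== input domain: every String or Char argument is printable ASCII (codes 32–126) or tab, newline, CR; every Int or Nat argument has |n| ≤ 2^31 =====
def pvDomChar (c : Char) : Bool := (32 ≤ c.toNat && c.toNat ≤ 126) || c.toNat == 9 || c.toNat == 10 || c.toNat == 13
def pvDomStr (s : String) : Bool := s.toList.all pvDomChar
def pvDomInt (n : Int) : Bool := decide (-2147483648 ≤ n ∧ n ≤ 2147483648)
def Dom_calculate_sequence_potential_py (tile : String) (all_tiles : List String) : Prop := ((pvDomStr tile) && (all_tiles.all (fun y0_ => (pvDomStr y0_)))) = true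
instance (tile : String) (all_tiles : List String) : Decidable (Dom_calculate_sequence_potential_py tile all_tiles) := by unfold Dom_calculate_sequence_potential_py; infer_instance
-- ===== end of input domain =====

-- B replaces A's candidate-string generation + four membership scans of the hand by a
-- single pass over all_tiles that parses each tile and sets existence flags per offset
-- (objective: alternative decomposition, same observable behaviour).

-- ===== PORT A =====
-- f"{n}{suit}"
def pvFStr (n : Int) (suit : Char) : String := String.ofList (PySem.Int.toChars n ++ [suit])

def calculate_sequence_potential_py (tile : String) (all_tiles : List String) : Int :=
  if !(PySem.Str.endswith tile "B" || PySem.Str.endswith tile "C" || PySem.Str.endswith tile "D") then 0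
  else
    match PySem.Str.pyGet? tile 0, PySem.Str.pyGet? tile (-1) with
    | some c0, some suit =>
      match PySem.Int.ofChars? [c0] with   -- int(tile[0]); none = ValueError, excluded by Pre_
      | some number =>
        let adjacent_tiles : List String :=
          (if number > 1 then [pvFStr (number - 1) suit] else []) ++
          (if number < 9 then [pvFStr (number + 1) suit] else [])
        let two_away_tiles : List String :=
          (if number > 2 then [pvFStr (number - 2) suit] else []) ++
          (if number < 8 then [pvFStr (number + 2) suit] else [])
        let adjacent_count := adjacent_tiles.countP (fun t => all_tiles.contains t)
        let two_away_count := two_away_tiles.countP (fun t => all_tiles.contains t)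
        if adjacent_count = 2 then 6
        else if adjacent_count = 1 then 3
        else if two_away_count > 0 then 1
        else 0
      | none => 0   -- unreachable under Pre_
    | _, _ => 0     -- unreachable: tile is nonempty whenever endswith holds

-- ===== PORT B =====
-- one loop step of Source B: classify tile t by its offset from `number` and update the flags
def pvAltStep (number : Int) (suit : Char) (f : Bool × Bool × Bool × Bool) (t : String) :
    Bool × Bool × Bool × Bool :=
  match t.toList with      -- len(t) == 2 gives the two characters t[0], t[1]
  | [a, b] =>
    if b = suit ∧ '0' ≤ a ∧ a ≤ '9' then
      let d : Int := (a.toNat : Int) - 48 - number    -- ord(t[0]) - ord("0") - number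
      if d = -1 ∧ number > 1 then (true, f.2.1, f.2.2.1, f.2.2.2)
      else if d = 1 ∧ number < 9 then (f.1, true, f.2.2.1, f.2.2.2)
      else if d = -2 ∧ number > 2 then (f.1, f.2.1, true, f.2.2.2)
      else if d = 2 ∧ number < 8 then (f.1, f.2.1, f.2.2.1, true)
      else f
    else f
  | _ => f

def calculate_sequence_potential_py_alt (tile : String) (all_tiles : List String) : Int :=
  if !(PySem.Str.endswith tile "B" || PySem.Str.endswith tile "C" || PySem.Str.endswith tile "D") then 0
  else
    match PySem.Str.pyGet? tile 0 with
    | none => 0     -- unreachable: tile is nonempty whenever endswith holds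
    | some c0 =>
      match PySem.Str.pyGet? tile (-1) with
      | none => 0   -- unreachable
      | some suit =>
      match PySem.Int.ofChars? [c0] with   -- int(tile[0]); none = ValueError, excluded by Pre_
      | none => 0   -- unreachable under Pre_
      | some number =>
        let f := all_tiles.foldl (pvAltStep number suit) (false, false, false, false)
        let adjacent_count : Int := (if f.1 then 1 else 0) + (if f.2.1 then 1 else 0)
        if adjacent_count = 2 then 6
        else if adjacent_count = 1 then 3
        else if f.2.2.1 || f.2.2.2 then 1
        else 0

-- ===== PRECONDITION & SPEC =====
-- Pre_ excludes exactly the tiles ending in 'B'/'C'/'D' whose first character is not an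
-- ASCII digit: there Python's int(tile[0]) raises ValueError (in A and in B alike).
def Pre_calculate_sequence_potential_py (tile : String) (all_tiles : List String) : Prop :=
  (PySem.Str.endswith tile "B" || PySem.Str.endswith tile "C" || PySem.Str.endswith tile "D") = true →
    ('0' ≤ tile.toList.headD ' ' ∧ tile.toList.headD ' ' ≤ '9')
instance (tile : String) (all_tiles : List String) : Decidable (Pre_calculate_sequence_potential_py tile all_tiles) := by unfold Pre_calculate_sequence_potential_py; infer_instance

def pvWitness_calculate_sequence_potential_py : String × List String := ("3B", ["2B", "4B", "1C"])

def Spec_calculate_sequence_potential_py (tile : String) (all_tiles : List String) (out : Int) : Prop := out = calculate_sequence_potential_py_alt tile all_tiles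
instance (tile : String) (all_tiles : List String) (out : Int) : Decidable (Spec_calculate_sequence_potential_py tile all_tiles out) := by unfold Spec_calculate_sequence_potential_py; infer_instance

-- ===== CLAIM (what is proved, stated in full; the proofs are below) =====
def Claim_equal_calculate_sequence_potential_py : Prop := ∀ (tile : String) (all_tiles : List String), Dom_calculate_sequence_potential_py tile all_tiles → Pre_calculate_sequence_potential_py tile all_tiles → Spec_calculate_sequence_potential_py tile all_tiles (calculate_sequence_potential_py tile all_tiles)

-- ===== LEMMAS AND PROOFS =====

-- int(s) for a single ASCII digit character
theorem pv_ofChars_digit (c : Char) (h1 : '0' ≤ c) (h2 : c ≤ '9') :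
    PySem.Int.ofChars? [c] = some ((c.toNat : Int) - 48) := by
  obtain ⟨n, rfl, h48, h57⟩ : ∃ n, c = Char.ofNat n ∧ 48 ≤ n ∧ n ≤ 57 :=
    ⟨c.toNat, (Char.ofNat_toNat c).symm, h1, h2⟩
  interval_cases n <;> decide

-- str(m) for a single-digit m
theorem pv_toChars_digit (m : Int) (h0 : 0 ≤ m) (h9 : m ≤ 9) :
    PySem.Int.toChars m = [Char.ofNat (48 + m.toNat)] := by
  interval_cases m <;> decide

-- the tiles of the hand that Source B's loop classifies as offset d
def pvHit (number : Int) (suit : Char) (d : Int) (t : String) : Bool :=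
  match t.toList with
  | [a, b] => decide (b = suit) && decide ('0' ≤ a) && decide (a ≤ '9') &&
              decide ((a.toNat : Int) - 48 - number = d)
  | _ => false

theorem pv_altStep_eq (number : Int) (suit : Char) (f : Bool × Bool × Bool × Bool) (t : String) :
    pvAltStep number suit f t =
      (f.1 || (pvHit number suit (-1) t && decide (number > 1)),
       f.2.1 || (pvHit number suit 1 t && decide (number < 9)),
       f.2.2.1 || (pvHit number suit (-2) t && decide (number > 2)),
       f.2.2.2 || (pvHit number suit 2 t && decide (number < 8))) := by
  unfold pvAltStep pvHit
  rcases ht : t.toList with _ | ⟨a, _ | ⟨b, _ | ⟨c, rest⟩⟩⟩ <;> try simp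
  by_cases hg : (b = suit ∧ '0' ≤ a ∧ a ≤ '9')
  case neg =>
    have hfalse : (decide (b = suit) && decide ('0' ≤ a) && decide (a ≤ '9')) = false := by
      by_cases h1 : b = suit <;> by_cases h2 : '0' ≤ a <;> by_cases h3 : a ≤ '9' <;>
        simp [h1, h2, h3] <;> exact hg ⟨h1, h2, h3⟩
    rcases f with ⟨f1, f2, f3, f4⟩
    simp [hg, hfalse]
  case pos =>
    obtain ⟨hb, ha1, ha2⟩ := hg
    simp only [hb, ha1, ha2, and_self, true_and, if_true, decide_true, Bool.true_and, decide_eq_true_eq]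
    split_ifs with h1 h2 h3 h4 <;> rcases f with ⟨f1, f2, f3, f4⟩
    · obtain ⟨hv, hn⟩ := h1
      simp [hv, hn, show ¬((a.toNat : Int) - 48 - number = 1) by omega,
        show ¬((a.toNat : Int) - 48 - number = -2) by omega,
        show ¬((a.toNat : Int) - 48 - number = 2) by omega]
    · obtain ⟨hv, hn⟩ := h2
      simp [hv, hn, show ¬((a.toNat : Int) - 48 - number = -1) by omega,
        show ¬((a.toNat : Int) - 48 - number = -2) by omega,
        show ¬((a.toNat : Int) - 48 - number = 2) by omega]
    · obtain ⟨hv, hn⟩ := h3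
      simp [hv, hn, show ¬((a.toNat : Int) - 48 - number = -1) by omega,
        show ¬((a.toNat : Int) - 48 - number = 1) by omega,
        show ¬((a.toNat : Int) - 48 - number = 2) by omega]
    · obtain ⟨hv, hn⟩ := h4
      simp [hv, hn, show ¬((a.toNat : Int) - 48 - number = -1) by omega,
        show ¬((a.toNat : Int) - 48 - number = 1) by omega,
        show ¬((a.toNat : Int) - 48 - number = -2) by omega]
    · have e1 : (decide ((a.toNat : Int) - 48 - number = -1) && decide (number > 1)) = false := by
        by_cases hv : (a.toNat : Int) - 48 - number = -1 <;> simp [hv] <;> omega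
      have e2 : (decide ((a.toNat : Int) - 48 - number = 1) && decide (number < 9)) = false := by
        by_cases hv : (a.toNat : Int) - 48 - number = 1 <;> simp [hv] <;> omega
      have e3 : (decide ((a.toNat : Int) - 48 - number = -2) && decide (number > 2)) = false := by
        by_cases hv : (a.toNat : Int) - 48 - number = -2 <;> simp [hv] <;> omega
      have e4 : (decide ((a.toNat : Int) - 48 - number = 2) && decide (number < 8)) = false := by
        by_cases hv : (a.toNat : Int) - 48 - number = 2 <;> simp [hv] <;> omega
      simp only [← Bool.and_assoc] at e1 e2 e3 e4 ⊢
      simp [e1, e2, e3, e4]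

theorem pv_foldl_flags (number : Int) (suit : Char) (ts : List String)
    (f : Bool × Bool × Bool × Bool) :
    ts.foldl (pvAltStep number suit) f =
      (f.1 || (ts.any (pvHit number suit (-1)) && decide (number > 1)),
       f.2.1 || (ts.any (pvHit number suit 1) && decide (number < 9)),
       f.2.2.1 || (ts.any (pvHit number suit (-2)) && decide (number > 2)),
       f.2.2.2 || (ts.any (pvHit number suit 2) && decide (number < 8))) := by
  induction ts generalizing f with
  | nil => simp
  | cons t ts ih =>
    simp only [List.foldl_cons, ih, pv_altStep_eq, List.any_cons]
    rcases f with ⟨f1, f2, f3, f4⟩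
    simp [Bool.and_or_distrib_right, Bool.or_assoc]

-- a tile hits offset d iff it IS the candidate string A builds, when m = number+d is a digit
theorem pv_hit_iff (number : Int) (suit : Char) (d : Int) (m : Int) (t : String)
    (hm : m = number + d) (h0 : 0 ≤ m) (h9 : m ≤ 9) :
    pvHit number suit d t = decide (t = pvFStr m suit) := by
  unfold pvHit pvFStr
  rw [pv_toChars_digit _ h0 h9]
  have htl : ∀ cs : List Char, (t = String.ofList cs) ↔ (t.toList = cs) := by
    intro cs
    constructor
    · rintro rfl; exact String.toList_ofList
    · intro h; rw [← h, String.ofList_toList]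
  rcases ht : t.toList with _ | ⟨a, _ | ⟨b, _ | ⟨c, rest⟩⟩⟩ <;>
    simp only [htl, ht, List.cons_append, List.nil_append] <;> try simp
  rw [Bool.eq_iff_iff]
  simp only [Bool.and_eq_true, decide_eq_true_eq, List.cons.injEq, and_true]
  constructor
  · rintro ⟨⟨⟨hb, h1⟩, h2⟩, hv⟩
    have hn : a.toNat = 48 + m.toNat := by
      have ha : (48 : Nat) ≤ a.toNat := h1
      have hb' : a.toNat ≤ 57 := h2
      omega
    refine ⟨by rw [← Char.ofNat_toNat a, hn], hb⟩
  · rintro ⟨rfl, rfl⟩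
    have hv : (Char.ofNat (48 + m.toNat)).toNat = 48 + m.toNat := by
      have h9' : m.toNat ≤ 9 := by omega
      interval_cases h : m.toNat <;> decide
    refine ⟨⟨⟨rfl, ?_⟩, ?_⟩, ?_⟩
    · show (48 : Nat) ≤ (Char.ofNat (48 + m.toNat)).toNat; rw [hv]; omega
    · show (Char.ofNat (48 + m.toNat)).toNat ≤ (57 : Nat); rw [hv]; omega
    · rw [hv]; omega

theorem pv_any_hit (number : Int) (suit : Char) (d : Int) (m : Int) (ts : List String)
    (hm : m = number + d) (h0 : 0 ≤ m) (h9 : m ≤ 9) :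
    ts.any (pvHit number suit d) = ts.contains (pvFStr m suit) := by
  have h : ∀ t ∈ ts, pvHit number suit d t = (t == pvFStr m suit) := by
    intro t _
    rw [pv_hit_iff number suit d m t hm h0 h9, Bool.beq_eq_decide_eq]
  rw [PySem.List.any_congr_mem h]
  exact List.any_beq'

-- ===== VERDICT (by name: the statement is the Claim_ definition above) =====
theorem calculate_sequence_potential_py_spec : Claim_equal_calculate_sequence_potential_py := by
  intro tile all_tiles _hDom hPre
  unfold Spec_calculate_sequence_potential_py
  unfold calculate_sequence_potential_py calculate_sequence_potential_py_alt
  by_cases hE : (PySem.Str.endswith tile "B" || PySem.Str.endswith tile "C" ||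
      PySem.Str.endswith tile "D") = true
  case neg =>
    rw [Bool.not_eq_true] at hE
    rw [hE]
    simp
  case pos =>
    rw [hE]
    simp only [Bool.not_true, Bool.false_eq_true, if_false]
    have hne : tile.toList ≠ [] := by
      intro he
      simp only [PySem.Str.endswith_eq, he] at hE
      revert hE; decide
    obtain ⟨c0, rest, hcs⟩ : ∃ c0 rest, tile.toList = c0 :: rest := by
      rcases h : tile.toList with _ | ⟨c0, rest⟩
      · exact absurd h hne
      · exact ⟨c0, rest, rfl⟩
    have hget0 : PySem.Str.pyGet? tile 0 = some c0 := by
      simp [PySem.Str.pyGet?_eq, hcs, PySem.List.pyGet?_zero_cons]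
    have hsome : (tile.toList.getLast?).isSome := by rw [hcs]; simp
    obtain ⟨suit, hlast⟩ := Option.isSome_iff_exists.mp hsome
    have hget1 : PySem.Str.pyGet? tile (-1) = some suit := by
      simp [PySem.Str.pyGet?_eq, PySem.List.pyGet?_neg_one, hlast]
    have hdig := hPre hE
    rw [hcs] at hdig; simp at hdig
    have hof : PySem.Int.ofChars? [c0] = some ((c0.toNat : Int) - 48) :=
      pv_ofChars_digit c0 hdig.1 hdig.2
    simp only [hget0, hget1, hof]
    set number : Int := (c0.toNat : Int) - 48 with hnum
    have hn0 : 0 ≤ number := by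
      have : (48 : Nat) ≤ c0.toNat := hdig.1
      omega
    have hn9 : number ≤ 9 := by
      have : c0.toNat ≤ 57 := hdig.2
      omega
    simp only [pv_foldl_flags, Bool.false_or]
    by_cases hg1 : number > 1 <;> by_cases hg2 : number < 9 <;>
      by_cases hg3 : number > 2 <;> by_cases hg4 : number < 8 <;>
    · first
      | (exfalso; omega)
      | (try rw [pv_any_hit number suit (-1) (number - 1) all_tiles (by ring) (by omega) (by omega)]
         try rw [pv_any_hit number suit 1 (number + 1) all_tiles (by ring) (by omega) (by omega)]
         try rw [pv_any_hit number suit (-2) (number - 2) all_tiles (by ring) (by omega) (by omega)]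
         try rw [pv_any_hit number suit 2 (number + 2) all_tiles (by ring) (by omega) (by omega)]
         by_cases h1 : pvFStr (number - 1) suit ∈ all_tiles <;>
         by_cases h2 : pvFStr (number + 1) suit ∈ all_tiles <;>
         by_cases h3 : pvFStr (number - 2) suit ∈ all_tiles <;>
         by_cases h4 : pvFStr (number + 2) suit ∈ all_tiles <;>
         simp [h1, h2, h3, h4, hg1, hg2, hg3, hg4, List.countP_cons, List.countP_nil,
           List.contains_eq_mem])
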